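-- pv_equiv track=rewrite | github.com/ahihi102145/Python-core | BT_LOP/Tuan11/htt/pass_hidden_str.py | search_pass
-- ===== SOURCE A (Python) =====
-- mode = 10**9+7
--
-- def search_pass(s):
--     total =1
--     cur=""
--     for c in s:
--         if c.isdigit():
--             cur+=c
--         else:
--             if cur!="":
--                 total = (total* int(cur))%mode
--                 cur=""
--     if cur!="":
--         total = (total* int(cur))%mode
--     return total
-- ===== SOURCE B (Python) =====
-- def search_pass(s):
--     MOD = 10**9 + 7
--     # phase 1: tokenize the maximal digit runs by index jumps
--     runs = []
--     i, n = 0, len(s)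
--     while i < n:
--         if s[i].isdigit():
--             j = i + 1
--             while j < n and s[j].isdigit():
--                 j += 1
--             runs.append(int(s[i:j]))
--             i = j
--         else:
--             i += 1
--     # phase 2: fold the product mod MOD
--     total = 1
--     for v in runs:
--         total = total * v % MOD
--     return total
-- ===== Notes on version B (the rewrite author's own statement) =====
-- stated objective: alternative
-- what changed: Replaced the per-character cur/flush state machine with a two-phase structure: an index-jumping tokenizer that extracts the maximal digit runs, then a fold multiplying them modulo 10**9+7.
import Mathlib
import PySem

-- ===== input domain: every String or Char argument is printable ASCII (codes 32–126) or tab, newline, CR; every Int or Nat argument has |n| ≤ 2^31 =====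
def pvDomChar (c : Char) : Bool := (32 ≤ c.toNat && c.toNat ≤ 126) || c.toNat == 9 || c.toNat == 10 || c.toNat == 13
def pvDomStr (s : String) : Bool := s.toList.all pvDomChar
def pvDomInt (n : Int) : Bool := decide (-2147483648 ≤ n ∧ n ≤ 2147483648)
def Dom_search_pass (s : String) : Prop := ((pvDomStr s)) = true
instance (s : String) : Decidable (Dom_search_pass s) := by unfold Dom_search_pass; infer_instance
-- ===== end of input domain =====

-- B replaces A's per-character cur/flush state machine by a two-phase
-- tokenize-the-digit-runs-then-fold-the-product structure (alternative decomposition, same cost).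

def pvMode : Int := 10 ^ 9 + 7

-- int(cur) for the (always nonempty, all-digit) pending run
def pvIntOf (cur : List Char) : Int := (PySem.Int.ofChars? cur).getD 0

-- ===== PORT A =====
-- loop body of A: state (total, cur)
def pvStepA (st : Int × List Char) (c : Char) : Int × List Char :=
  if PySem.Chars.isdigit c then (st.1, st.2 ++ [c])
  else if st.2 ≠ [] then ((st.1 * pvIntOf st.2) % pvMode, [])
  else st

def search_pass (s : String) : Int :=
  let st := s.toList.foldl pvStepA (1, [])
  if st.2 ≠ [] then (st.1 * pvIntOf st.2) % pvMode else st.1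

-- ===== PORT B =====
-- phase 1 of B: extract the maximal digit runs (the index jumps become takeWhile/dropWhile)
def pvRuns : List Char → List (List Char)
  | [] => []
  | c :: rest =>
    if PySem.Chars.isdigit c then
      (c :: rest.takeWhile PySem.Chars.isdigit) :: pvRuns (rest.dropWhile PySem.Chars.isdigit)
    else pvRuns rest
termination_by cs => cs.length
decreasing_by
  · exact Nat.lt_succ_of_le (List.dropWhile_sublist (l := rest) _).length_le
  · simp

def search_pass_alt (s : String) : Int :=
  ((pvRuns s.toList).map pvIntOf).foldl (fun t v => t * v % pvMode) 1

-- ===== PRECONDITION & SPEC =====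
def Spec_search_pass (s : String) (out : Int) : Prop := out = search_pass_alt s
instance (s : String) (out : Int) : Decidable (Spec_search_pass s out) := by unfold Spec_search_pass; infer_instance

-- ===== CLAIM (what is proved, stated in full; the proofs are below) =====
def Claim_equal_search_pass : Prop := ∀ (s : String), Dom_search_pass s → Spec_search_pass s (search_pass s)

-- ===== LEMMAS AND PROOFS =====

-- A's finishing step, and B's fold written over runs directly
def pvFinishA (st : Int × List Char) : Int :=
  if st.2 ≠ [] then (st.1 * pvIntOf st.2) % pvMode else st.1

def pvFoldMul (t : Int) (rs : List (List Char)) : Int :=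
  rs.foldl (fun t r => t * pvIntOf r % pvMode) t

-- consuming a digit run only appends it to cur
theorem pvStepA_run (run : List Char) (hrun : ∀ c ∈ run, PySem.Chars.isdigit c = true) :
    ∀ (rest : List Char) (total : Int) (cur : List Char),
      List.foldl pvStepA (total, cur) (run ++ rest)
        = List.foldl pvStepA (total, cur ++ run) rest := by
  induction run with
  | nil => simp
  | cons c cs ih =>
    intro rest total cur
    have hc := hrun c (by simp)
    simp only [List.cons_append, List.foldl_cons, pvStepA, hc, if_pos]
    rw [ih (fun d hd => hrun d (by simp [hd])) rest total (cur ++ [c])]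
    simp

-- main invariant: from an empty pending run, A's loop computes B's fold over the runs
theorem pvMain : ∀ (cs : List Char) (total : Int),
    pvFinishA (List.foldl pvStepA (total, []) cs) = pvFoldMul total (pvRuns cs) := by
  intro cs
  induction cs using pvRuns.induct with
  | case1 => intro total; simp [pvFinishA, pvFoldMul, pvRuns]
  | case2 c rest hd ih =>
    intro total
    have hsplit : c :: rest
        = (c :: rest.takeWhile PySem.Chars.isdigit) ++ rest.dropWhile PySem.Chars.isdigit := by
      simp [List.takeWhile_append_dropWhile]
    have hrun : ∀ d ∈ c :: rest.takeWhile PySem.Chars.isdigit,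
        PySem.Chars.isdigit d = true := by
      intro d hdm
      rcases List.mem_cons.mp hdm with h | h
      · exact h ▸ hd
      · exact List.mem_takeWhile_imp h
    have hruns : pvRuns (c :: rest)
        = (c :: rest.takeWhile PySem.Chars.isdigit)
          :: pvRuns (rest.dropWhile PySem.Chars.isdigit) := by
      rw [pvRuns.eq_def]; simp [hd]
    conv_lhs => rw [hsplit]
    rw [pvStepA_run _ hrun _ total [], hruns]
    simp only [List.nil_append]
    rw [pvFoldMul, List.foldl_cons, ← pvFoldMul]
    cases htail : rest.dropWhile PySem.Chars.isdigit with
    | nil =>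
      simp [pvFinishA, pvFoldMul, pvRuns]
    | cons d ds =>
      have hdnot : PySem.Chars.isdigit d = false := by
        have h2 := List.head_dropWhile_not (l := rest) (p := PySem.Chars.isdigit)
          (by simp [htail])
        simp only [htail, List.head_cons] at h2
        simpa using h2
      rw [List.foldl_cons]
      have hstep : pvStepA (total, c :: rest.takeWhile PySem.Chars.isdigit) d
          = (total * pvIntOf (c :: rest.takeWhile PySem.Chars.isdigit) % pvMode, []) := by
        simp [pvStepA, hdnot]
      rw [hstep]
      rw [htail] at ih
      have ih' := ih (total * pvIntOf (c :: rest.takeWhile PySem.Chars.isdigit) % pvMode)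
      have hpeel : List.foldl pvStepA
            (total * pvIntOf (c :: rest.takeWhile PySem.Chars.isdigit) % pvMode, []) (d :: ds)
          = List.foldl pvStepA
            (total * pvIntOf (c :: rest.takeWhile PySem.Chars.isdigit) % pvMode, []) ds := by
        simp [pvStepA, hdnot]
      rw [hpeel] at ih'
      exact ih'
  | case3 c rest hd ih =>
    intro total
    have hpeel : List.foldl pvStepA (total, []) (c :: rest)
        = List.foldl pvStepA (total, []) rest := by
      simp [pvStepA, hd]
    have hruns : pvRuns (c :: rest) = pvRuns rest := by
      rw [pvRuns.eq_def]
      simp only []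
      simp [hd]
    rw [hpeel, hruns]
    exact ih total

-- ===== VERDICT (by name: the statement is the Claim_ definition above) =====
theorem search_pass_spec : Claim_equal_search_pass := by
  intro s _
  unfold Spec_search_pass search_pass search_pass_alt
  have h := pvMain s.toList 1
  simp only [pvFinishA, pvFoldMul] at h
  rw [h, List.foldl_map]
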